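-- pv_equiv track=rewrite | github.com/gonza0822/Gonzalo.Ceballos-DesafiosStark | desafios_stark/desafio_stark04.py | obtener_lista_de_tipos
-- ===== SOURCE A (Python) =====
-- def capitalizar_palabras(cadena:str):
--     lista_palabra = cadena.split(" ")
--     for i in range(len(lista_palabra)):
--         lista_palabra[i] = lista_palabra[i].capitalize()
--     cadena = " ".join(lista_palabra)
--     return cadena
--
-- def obtener_lista_de_tipos(lista:list, key:str):
--     lista_de_tipos = []
--     for heroes in lista:
--         if(heroes[key] == ""):
--             lista_de_tipos.append("N/A")
--         lista_de_tipos.append(capitalizar_palabras(heroes[key]))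
--     for keys in lista_de_tipos:
--         if(keys == ""):
--             lista_de_tipos.remove(keys)
--     lista_de_tipos = set(lista_de_tipos)
--     return lista_de_tipos
-- ===== SOURCE B (Python) =====
-- def capitalizar_palabras(cadena: str):
--     lista_palabra = cadena.split(" ")
--     for i in range(len(lista_palabra)):
--         lista_palabra[i] = lista_palabra[i].capitalize()
--     cadena = " ".join(lista_palabra)
--     return cadena
--
-- def obtener_lista_de_tipos(lista: list, key: str):
--     tipos = set()
--     for heroe in lista:
--         valor = heroe[key]
--         tipos.add("N/A" if valor == "" else capitalizar_palabras(valor))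
--     return tipos
-- ===== Notes on version B (the rewrite author's own statement) =====
-- stated objective: simpler
-- what changed: Builds the result set directly in one conditional pass per hero, dropping A's build-with-double-append list, the mutate-while-iterating remove loop (which provably deletes every empty string), and the final set() conversion.
import Mathlib
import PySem

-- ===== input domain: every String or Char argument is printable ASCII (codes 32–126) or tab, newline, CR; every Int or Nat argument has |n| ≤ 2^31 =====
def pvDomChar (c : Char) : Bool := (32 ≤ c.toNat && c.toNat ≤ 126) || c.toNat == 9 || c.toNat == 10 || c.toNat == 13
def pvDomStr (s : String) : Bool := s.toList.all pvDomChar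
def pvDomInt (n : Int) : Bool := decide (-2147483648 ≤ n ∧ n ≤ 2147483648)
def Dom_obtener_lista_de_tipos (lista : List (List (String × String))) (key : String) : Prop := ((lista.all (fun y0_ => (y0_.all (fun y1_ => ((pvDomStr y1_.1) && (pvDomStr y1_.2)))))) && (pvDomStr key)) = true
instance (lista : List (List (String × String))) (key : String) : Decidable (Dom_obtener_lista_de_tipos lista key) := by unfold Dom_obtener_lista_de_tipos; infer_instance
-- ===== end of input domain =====

-- B builds the result set directly in one conditional pass per hero, dropping A's list build with
-- double append, A's mutate-while-iterating remove loop and the final set() conversion (objective: simpler).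

-- ===== PORT A =====

-- str.capitalize() on one word: first char upper-cased, rest lower-cased (exact on ASCII)
def capWord (w : List Char) : List Char :=
  match w with
  | [] => []
  | c :: rest => PySem.Chars.upperChar c :: rest.map PySem.Chars.lowerChar

def capitalizar_palabras (cadena : String) : String :=
  String.ofList (PySem.Chars.join [' '] ((PySem.Chars.splitOn cadena.toList [' ']).map capWord))

-- the CPython for-loop over a list mutated by .remove: index-based iteration, remove = first match
def removeLoop (l : List String) (i : Nat) : List String :=
  if h : i < l.length then
    if l[i] == "" then
      removeLoop ((PySem.List.remove? l "").getD l) (i + 1)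
    else
      removeLoop l (i + 1)
  else l
termination_by l.length - i
decreasing_by
  · have hm : "" ∈ l := by
      have := List.getElem_mem h
      simpa [eq_of_beq (by assumption : (l[i] == "") = true)] using this
    rw [PySem.List.remove?_eq_some_erase l "" hm]
    have := List.length_erase_of_mem hm
    simp only [Option.getD_some]
    omega
  · omega

def stepA (key : String) (acc : List String) (heroes : List (String × String)) : List String :=
  let v := ((PySem.Dict.mk heroes).get? key).getD ""
  let acc1 := if v == "" then acc ++ ["N/A"] else acc
  acc1 ++ [capitalizar_palabras v]

def obtener_lista_de_tipos (lista : List (List (String × String))) (key : String) : List String :=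
  let lista_de_tipos := lista.foldl (stepA key) []
  let lista_de_tipos2 := removeLoop lista_de_tipos 0
  PySem.Set.ofList lista_de_tipos2

-- ===== PORT B =====
def obtener_lista_de_tipos_alt (lista : List (List (String × String))) (key : String) : List String :=
  lista.foldl (fun tipos heroe =>
    let valor := ((PySem.Dict.mk heroe).get? key).getD ""
    PySem.Set.add tipos (if valor == "" then "N/A" else capitalizar_palabras valor))
    PySem.Set.empty

-- ===== PRECONDITION & SPEC =====
-- Pre_: every hero dict contains the key (otherwise Python's heroes[key] raises KeyError in both A and B)
def Pre_obtener_lista_de_tipos (lista : List (List (String × String))) (key : String) : Prop :=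
  ∀ h ∈ lista, (PySem.Dict.mk h).contains key = true
instance (lista : List (List (String × String))) (key : String) : Decidable (Pre_obtener_lista_de_tipos lista key) := by unfold Pre_obtener_lista_de_tipos; infer_instance

def pvWitness_obtener_lista_de_tipos : (List (List (String × String))) × String :=
  ([[("tipo", "fuerza bruta")], [("tipo", "")], [("tipo", "fuerza bruta")]], "tipo")

def Spec_obtener_lista_de_tipos (lista : List (List (String × String))) (key : String) (out : List String) : Prop := out = obtener_lista_de_tipos_alt lista key
instance (lista : List (List (String × String))) (key : String) (out : List String) : Decidable (Spec_obtener_lista_de_tipos lista key out) := by unfold Spec_obtener_lista_de_tipos; infer_instance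

-- ===== CLAIM (what is proved, stated in full; the proofs are below) =====
def Claim_equal_obtener_lista_de_tipos : Prop := ∀ (lista : List (List (String × String))) (key : String), Dom_obtener_lista_de_tipos lista key → Pre_obtener_lista_de_tipos lista key → Spec_obtener_lista_de_tipos lista key (obtener_lista_de_tipos lista key)

-- ===== LEMMAS AND PROOFS =====

-- the per-hero value B inserts
def fEl (key : String) (h : List (String × String)) : String :=
  let v := ((PySem.Dict.mk h).get? key).getD ""
  if v == "" then "N/A" else capitalizar_palabras v

-- the block of entries A's first loop appends for one hero
def blk (key : String) (h : List (String × String)) : List String :=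
  let v := ((PySem.Dict.mk h).get? key).getD ""
  if v == "" then ["N/A", ""] else [capitalizar_palabras v]

theorem join_cons_ne (sep p : List Char) (ps : List (List Char)) (h : ps ≠ []) :
    PySem.Chars.join sep (p :: ps) = p ++ sep ++ PySem.Chars.join sep ps := by
  cases ps with
  | nil => exact absurd rfl h
  | cons q t => exact PySem.Chars.join_cons_cons ..

theorem join_append_singleton (sep b : List Char) (xs : List (List Char)) (h : xs ≠ []) :
    PySem.Chars.join sep (xs ++ [b]) = PySem.Chars.join sep xs ++ sep ++ b := by
  induction xs with
  | nil => exact absurd rfl h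
  | cons a t ih =>
    cases t with
    | nil => simp [PySem.Chars.join_cons_cons, PySem.Chars.join_singleton]
    | cons a' t' =>
      rw [List.cons_append, join_cons_ne sep a _ (by simp), ih (by simp),
        join_cons_ne sep a _ (by simp)]
      simp [List.append_assoc]

theorem join_append_pair (sep a b : List Char) (xs : List (List Char)) :
    PySem.Chars.join sep (xs ++ [a, b]) = PySem.Chars.join sep (xs ++ [a ++ sep ++ b]) := by
  cases xs with
  | nil =>
    simp [PySem.Chars.join_cons_cons, PySem.Chars.join_singleton, List.append_assoc]
  | cons x t =>
    have h1 : (x :: t) ++ [a, b] = ((x :: t) ++ [a]) ++ [b] := by simp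
    rw [h1, join_append_singleton sep b _ (by simp), join_append_singleton sep a _ (by simp),
      join_append_singleton sep _ _ (by simp)]
    simp [List.append_assoc]

-- invariant of the fuel-based split loop: joining the pieces restores the input
theorem go_join (sep : List Char) : ∀ (fuel : Nat) (l cur : List Char) (acc : List (List Char)),
    PySem.Chars.join sep (PySem.Chars.splitOn.go sep fuel l cur acc) =
      PySem.Chars.join sep (acc.reverse ++ [cur.reverse ++ l]) := by
  intro fuel
  induction fuel with
  | zero => intro l cur acc; rw [PySem.Chars.splitOn.go]; simp
  | succ f ih =>
    intro l cur acc
    cases l with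
    | nil => rw [PySem.Chars.splitOn.go] <;> simp
    | cons c rest =>
      rw [PySem.Chars.splitOn.go]
      by_cases hp : sep.isPrefixOf (c :: rest) = true
      · rw [if_pos hp, ih]
        obtain ⟨d, hd⟩ := List.isPrefixOf_iff_prefix.mp hp
        have hdrop : List.drop sep.length (c :: rest) = d := by
          rw [← hd]; simp
        rw [hdrop, ← hd]
        have h2 : (cur.reverse :: acc).reverse ++ [[].reverse ++ d] = acc.reverse ++ [cur.reverse, d] := by
          simp
        rw [h2, join_append_pair]
        simp [List.append_assoc]
      · rw [if_neg hp, ih]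
        simp [List.append_assoc]

theorem join_splitOn (s sep : List Char) :
    PySem.Chars.join sep (PySem.Chars.splitOn s sep) = s := by
  unfold PySem.Chars.splitOn
  rw [go_join]
  simp [PySem.Chars.join_singleton]

theorem capWord_length (w : List Char) : (capWord w).length = w.length := by
  cases w <;> simp [capWord]

theorem join_map_capWord_length (sep : List Char) (parts : List (List Char)) :
    (PySem.Chars.join sep (parts.map capWord)).length = (PySem.Chars.join sep parts).length := by
  induction parts with
  | nil => simp
  | cons p t ih =>
    cases t with
    | nil => simp [PySem.Chars.join_singleton, capWord_length]
    | cons q t' =>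
      simp only [List.map_cons, PySem.Chars.join_cons_cons] at *
      simp [capWord_length, ih]

theorem cap_ne_empty (s : String) (h : s ≠ "") : capitalizar_palabras s ≠ "" := by
  intro hc
  apply h
  have h1 : (capitalizar_palabras s).toList = [] := by rw [hc]; rfl
  unfold capitalizar_palabras at h1
  rw [String.toList_ofList] at h1
  have h2 := join_map_capWord_length [' '] (PySem.Chars.splitOn s.toList [' '])
  rw [h1, join_splitOn] at h2
  exact String.toList_eq_nil_iff.mp (List.eq_nil_of_length_eq_zero h2.symm)

theorem cap_empty : capitalizar_palabras "" = "" := by decide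

theorem foldl_stepA (key : String) : ∀ (lista : List (List (String × String))) (acc : List String),
    lista.foldl (stepA key) acc = acc ++ (lista.map (blk key)).flatten := by
  intro lista
  induction lista with
  | nil => simp
  | cons h t ih =>
    intro acc
    simp only [List.foldl_cons, ih, List.map_cons, List.flatten_cons]
    unfold stepA blk
    by_cases hv : (((PySem.Dict.mk h).get? key).getD "" == "") = true
    · have hv' : ((PySem.Dict.mk h).get? key).getD "" = "" := eq_of_beq hv
      simp [hv', cap_empty]
    · simp [hv, List.append_assoc]

-- shape of the blocks: ["N/A", ""] or a singleton non-empty string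
theorem blk_good (key : String) (h : List (String × String)) :
    blk key h = ["N/A", ""] ∨ ∃ w, w ≠ "" ∧ blk key h = [w] := by
  unfold blk
  by_cases hv : (((PySem.Dict.mk h).get? key).getD "" == "") = true
  · left; simp [hv]
  · right
    exact ⟨capitalizar_palabras (((PySem.Dict.mk h).get? key).getD ""),
      cap_ne_empty _ (by simpa using hv), by simp [hv]⟩

theorem removeLoop_stop (l : List String) (i : Nat) (h : ¬ i < l.length) :
    removeLoop l i = l := by
  rw [removeLoop, dif_neg h]

theorem removeLoop_step (l : List String) (i : Nat) (h : i < l.length) :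
    removeLoop l i =
      if l[i] == "" then removeLoop ((PySem.List.remove? l "").getD l) (i + 1)
      else removeLoop l (i + 1) := by
  rw [removeLoop, dif_pos h]

-- the remove loop on a block list: it deletes exactly the empty strings
theorem removeLoop_blocks : ∀ (bs : List (List String)),
    (∀ b ∈ bs, b = ["N/A", ""] ∨ ∃ w, w ≠ "" ∧ b = [w]) →
    ∀ (P : List String), (∀ x ∈ P, x ≠ "") →
      removeLoop (P ++ bs.flatten) P.length = P ++ bs.flatten.filter (· != "") ∧
      removeLoop (P ++ bs.flatten) (P.length + 1) = P ++ bs.flatten.filter (· != "") := by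
  intro bs
  induction bs with
  | nil =>
    intro _ P hP
    constructor <;> (rw [removeLoop_stop] <;> simp)
  | cons b t ih =>
    intro hgood P hP
    have ht : ∀ x ∈ t, x = ["N/A", ""] ∨ ∃ w, w ≠ "" ∧ x = [w] :=
      fun x hx => hgood x (List.mem_cons_of_mem _ hx)
    rcases hgood b (List.mem_cons_self ..) with hb | ⟨w, hw, hb⟩
    · -- b = ["N/A", ""]
      subst hb
      have hlen1 : P.length + 1 < (P ++ (["N/A", ""] :: t).flatten).length := by simp
      have hlen0 : P.length < (P ++ (["N/A", ""] :: t).flatten).length := by simp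
      have hget1 : (P ++ (["N/A", ""] :: t).flatten)[P.length + 1]'hlen1 = "" := by
        rw [List.getElem_append_right (by omega)]
        simp
      have hget0 : (P ++ (["N/A", ""] :: t).flatten)[P.length]'hlen0 = "N/A" := by
        rw [List.getElem_append_right (le_refl _)]
        simp
      have hmem : "" ∈ P ++ (["N/A", ""] :: t).flatten := by simp
      have herase : (P ++ (["N/A", ""] :: t).flatten).erase "" = P ++ "N/A" :: t.flatten := by
        have h1 : P ++ (["N/A", ""] :: t).flatten = P ++ "N/A" :: "" :: t.flatten := by simp
        rw [h1, List.erase_append_right _ (by simpa using fun hx => hP "" hx rfl)]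
        simp
      have hP' : ∀ x ∈ P ++ ["N/A"], x ≠ "" := by
        intro x hx
        rcases List.mem_append.mp hx with hx | hx
        · exact hP x hx
        · simp at hx; subst hx; decide
      have hrec := (ih ht (P ++ ["N/A"]) hP').2
      simp only [List.append_assoc, List.singleton_append, List.length_append,
        List.length_cons, List.length_nil] at hrec
      have hL2 : removeLoop (P ++ (["N/A", ""] :: t).flatten) (P.length + 1) =
          P ++ (["N/A", ""] :: t).flatten.filter (· != "") := by
        rw [removeLoop_step _ _ hlen1, hget1, if_pos (by rfl),
          PySem.List.remove?_eq_some_erase _ _ hmem, Option.getD_some, herase]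
        have h2 : P.length + 0 + 1 + 1 = P.length + 1 + 1 := by omega
        rw [h2] at hrec
        rw [hrec]
        simp
      refine ⟨?_, hL2⟩
      rw [removeLoop_step _ _ hlen0, hget0, if_neg (by decide)]
      exact hL2
    · -- b = [w], w ≠ ""
      subst hb
      have hP' : ∀ x ∈ P ++ [w], x ≠ "" := by
        intro x hx
        rcases List.mem_append.mp hx with hx | hx
        · exact hP x hx
        · simp at hx; subst hx; exact hw
      have hlen0 : P.length < (P ++ ([w] :: t).flatten).length := by simp
      have hget0 : (P ++ ([w] :: t).flatten)[P.length]'hlen0 = w := by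
        rw [List.getElem_append_right (le_refl _)]
        simp
      have hrec := (ih ht (P ++ [w]) hP').1
      simp only [List.append_assoc, List.singleton_append, List.length_append,
        List.length_cons, List.length_nil] at hrec
      have hL2 : removeLoop (P ++ ([w] :: t).flatten) (P.length + 1) =
          P ++ ([w] :: t).flatten.filter (· != "") := by
        have h1 : P ++ ([w] :: t).flatten = P ++ w :: t.flatten := by simp
        have h2 : P.length + 0 + 1 = P.length + 1 := by omega
        rw [h2] at hrec
        rw [h1, hrec]
        simp [hw]
      refine ⟨?_, hL2⟩
      rw [removeLoop_step _ _ hlen0, hget0, if_neg (by simpa using hw)]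
      exact hL2

theorem filter_flatten_blk (key : String) (lista : List (List (String × String))) :
    ((lista.map (blk key)).flatten).filter (· != "") = lista.map (fEl key) := by
  induction lista with
  | nil => simp
  | cons h t ih =>
    simp only [List.map_cons, List.flatten_cons, List.filter_append, ih]
    unfold blk fEl
    by_cases hv : (((PySem.Dict.mk h).get? key).getD "" == "") = true
    · simp [hv]
    · have hne := cap_ne_empty (((PySem.Dict.mk h).get? key).getD "") (by simpa using hv)
      simp [hv, hne]

-- ===== VERDICT (by name: the statement is the Claim_ definition above) =====
theorem obtener_lista_de_tipos_spec : Claim_equal_obtener_lista_de_tipos := by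
  intro lista key _ _
  unfold Spec_obtener_lista_de_tipos obtener_lista_de_tipos obtener_lista_de_tipos_alt
  simp only [foldl_stepA, List.nil_append]
  have h0 := (removeLoop_blocks (lista.map (blk key))
      (by intro b hb; rcases List.mem_map.mp hb with ⟨h, _, rfl⟩; exact blk_good key h)
      [] (by simp)).1
  simp only [List.nil_append, List.length_nil] at h0
  rw [h0, filter_flatten_blk]
  rw [← PySem.Set.update_nil_left, PySem.Set.update_map_eq_foldl_add]
  rfl
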